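-- pv_equiv track=rewrite | github.com/pypi-data/pypi-mirror-383 | packages/kagglerboze/kagglerboze-0.2.3.tar.gz/kagglerboze-0.2.3/src/kaggler/domains/manufacturing/inspector.py | _generate_inspector_notes
-- ===== SOURCE A (Python) =====
-- from typing import Any, Dict, List, Optional
--
-- def _generate_inspector_notes(defects: List[Dict[str, Any]]) -> str:
--     """Generate inspector notes."""
--     if not defects:
--         return "No defects detected. Product meets all quality standards."
--
--     critical = [d for d in defects if d.get("severity") == "critical"]
--     major = [d for d in defects if d.get("severity") == "major"]
--     minor = [d for d in defects if d.get("severity") == "minor"]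
--
--     notes = []
--     if critical:
--         notes.append(f"{len(critical)} critical defect(s) detected")
--     if major:
--         notes.append(f"{len(major)} major defect(s) detected")
--     if minor:
--         notes.append(f"{len(minor)} minor defect(s) detected")
--
--     return ". ".join(notes) + "."
-- ===== SOURCE B (Python) =====
-- def _generate_inspector_notes(defects):
--     """Generate inspector notes (single tally pass + fixed-order formatting table)."""
--     if not defects:
--         return "No defects detected. Product meets all quality standards."
--     counts = {}
--     for d in defects:
--         s = d.get("severity")
--         counts[s] = counts.get(s, 0) + 1
--     notes = [f"{counts[k]}{label}"
--              for k, label in (("critical", " critical defect(s) detected"),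
--                               ("major", " major defect(s) detected"),
--                               ("minor", " minor defect(s) detected"))
--              if counts.get(k, 0)]
--     return ". ".join(notes) + "."
-- ===== Notes on version B (the rewrite author's own statement) =====
-- stated objective: simpler
-- what changed: Replaces the three separate filtering scans over the defect list by one tally pass into a dict keyed by severity followed by a single fixed-order formatting pass over a (key,label) table.
import Mathlib
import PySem

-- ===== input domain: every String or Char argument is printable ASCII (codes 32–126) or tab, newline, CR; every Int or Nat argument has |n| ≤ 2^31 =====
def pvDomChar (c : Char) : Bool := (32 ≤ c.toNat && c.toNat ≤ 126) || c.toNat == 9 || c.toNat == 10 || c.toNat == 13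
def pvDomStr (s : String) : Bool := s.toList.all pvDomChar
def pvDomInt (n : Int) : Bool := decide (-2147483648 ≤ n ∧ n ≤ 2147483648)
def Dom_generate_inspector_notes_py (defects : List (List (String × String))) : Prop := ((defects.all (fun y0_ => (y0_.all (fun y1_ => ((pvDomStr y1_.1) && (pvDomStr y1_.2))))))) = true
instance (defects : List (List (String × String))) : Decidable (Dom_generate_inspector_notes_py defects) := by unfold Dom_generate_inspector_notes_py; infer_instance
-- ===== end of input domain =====

-- B builds one severity tally in a single pass and formats it with a fixed (key,label) table,
-- instead of A's three separate filtering scans; objective: simpler (same asymptotic cost).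

-- ===== PORT A =====
-- dict.get("severity") on an association-list dict: first matching key (shared dict primitive).
def pvSev (d : List (String × String)) : Option String := List.lookup "severity" d

def generate_inspector_notes_py (defects : List (List (String × String))) : String :=
  if defects.isEmpty then "No defects detected. Product meets all quality standards."
  else
    let critical := defects.filter (fun d => pvSev d == some "critical")
    let major := defects.filter (fun d => pvSev d == some "major")
    let minor := defects.filter (fun d => pvSev d == some "minor")
    let notes : List String :=
      (if critical.isEmpty then [] else [PySem.Int.toStr (critical.length : Int) ++ " critical defect(s) detected"]) ++
      (if major.isEmpty then [] else [PySem.Int.toStr (major.length : Int) ++ " major defect(s) detected"]) ++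
      (if minor.isEmpty then [] else [PySem.Int.toStr (minor.length : Int) ++ " minor defect(s) detected"])
    PySem.Str.join ". " notes ++ "."

-- ===== PORT B =====
def generate_inspector_notes_py_alt (defects : List (List (String × String))) : String :=
  if defects.isEmpty then "No defects detected. Product meets all quality standards."
  else
    let counts : PySem.Dict (Option String) Int :=
      defects.foldl (fun c d =>
        let s := pvSev d
        c.insert s (c.getD s 0 + 1)) PySem.Dict.empty
    let notes : List String :=
      ([("critical", " critical defect(s) detected"), ("major", " major defect(s) detected"),
        ("minor", " minor defect(s) detected")] : List (String × String)).foldr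
        (fun kl acc =>
          if counts.getD (some kl.1) 0 != 0 then
            (PySem.Int.toStr (counts.getD (some kl.1) 0) ++ kl.2) :: acc
          else acc) []
    PySem.Str.join ". " notes ++ "."

-- ===== PRECONDITION & SPEC =====
def Spec_generate_inspector_notes_py (defects : List (List (String × String))) (out : String) : Prop := out = generate_inspector_notes_py_alt defects
instance (defects : List (List (String × String))) (out : String) : Decidable (Spec_generate_inspector_notes_py defects out) := by unfold Spec_generate_inspector_notes_py; infer_instance

-- ===== CLAIM (what is proved, stated in full; the proofs are below) =====
def Claim_equal_generate_inspector_notes_py : Prop := ∀ (defects : List (List (String × String))), Dom_generate_inspector_notes_py defects → Spec_generate_inspector_notes_py defects (generate_inspector_notes_py defects)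

-- ===== LEMMAS AND PROOFS =====

-- B's tally at key (some k) is the length of A's filter for severity k.
theorem pv_counts_getD (defects : List (List (String × String))) (k : String) :
    (defects.foldl (fun c d =>
        let s := pvSev d
        c.insert s (c.getD s 0 + 1)) (PySem.Dict.empty : PySem.Dict (Option String) Int)).getD (some k) 0
      = ((defects.filter (fun d => pvSev d == some k)).length : Int) := by
  have h : (defects.foldl (fun c d =>
        let s := pvSev d
        c.insert s (c.getD s 0 + 1)) (PySem.Dict.empty : PySem.Dict (Option String) Int))
      = (defects.map pvSev).foldl (fun c s => c.insert s (c.getD s 0 + 1)) PySem.Dict.empty := by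
    rw [List.foldl_map]
  rw [h, PySem.Dict.getD_foldl_insert_add_one, PySem.Dict.getD_empty, zero_add,
    List.count_eq_countP, List.countP_map]
  rw [List.countP_eq_length_filter]
  rfl

theorem pv_notes_eq (defects : List (List (String × String))) :
    ([("critical", " critical defect(s) detected"), ("major", " major defect(s) detected"),
      ("minor", " minor defect(s) detected")] : List (String × String)).foldr
        (fun kl acc =>
          if (defects.foldl (fun c d =>
                let s := pvSev d
                c.insert s (c.getD s 0 + 1)) (PySem.Dict.empty : PySem.Dict (Option String) Int)).getD (some kl.1) 0 != 0 then
            (PySem.Int.toStr ((defects.foldl (fun c d =>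
                let s := pvSev d
                c.insert s (c.getD s 0 + 1)) (PySem.Dict.empty : PySem.Dict (Option String) Int)).getD (some kl.1) 0) ++ kl.2) :: acc
          else acc) []
    = (if (defects.filter (fun d => pvSev d == some "critical")).isEmpty then [] else [PySem.Int.toStr ((defects.filter (fun d => pvSev d == some "critical")).length : Int) ++ " critical defect(s) detected"]) ++
      (if (defects.filter (fun d => pvSev d == some "major")).isEmpty then [] else [PySem.Int.toStr ((defects.filter (fun d => pvSev d == some "major")).length : Int) ++ " major defect(s) detected"]) ++
      (if (defects.filter (fun d => pvSev d == some "minor")).isEmpty then [] else [PySem.Int.toStr ((defects.filter (fun d => pvSev d == some "minor")).length : Int) ++ " minor defect(s) detected"]) := by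
  simp only [List.foldr, pv_counts_getD]
  have hcond : ∀ (l : List (List (String × String))),
      ((l.length : Int) != 0) = !l.isEmpty := by
    intro l
    cases l with
    | nil => simp
    | cons a t => simp; omega
  rw [hcond, hcond, hcond]
  by_cases h1 : (defects.filter (fun d => pvSev d == some "critical")).isEmpty <;>
    by_cases h2 : (defects.filter (fun d => pvSev d == some "major")).isEmpty <;>
      by_cases h3 : (defects.filter (fun d => pvSev d == some "minor")).isEmpty <;>
        simp [h1, h2, h3]

-- ===== VERDICT (by name: the statement is the Claim_ definition above) =====
theorem generate_inspector_notes_py_spec : Claim_equal_generate_inspector_notes_py := by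
  intro defects _
  unfold Spec_generate_inspector_notes_py generate_inspector_notes_py generate_inspector_notes_py_alt
  by_cases h : defects.isEmpty
  · simp [h]
  · simp only [h, if_neg, Bool.false_eq_true, not_false_eq_true]
    rw [pv_notes_eq]
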